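-- pv_equiv track=rewrite | github.com/tanmoyjana/Assignments | assignments/assignments2.py | getMaximumPoints
-- ===== SOURCE A (Python) =====
-- def getMaximumPoints(A, B, C, N):
--     i=0
--     FinalPoints=0
--     while i<N:
--         x=max(A,B,C)
--         if(x>=1):
--             x=max(A,B,C)
--             FinalPoints=FinalPoints+x
--             if(x==A):
--                 A=A-1
--             elif(x==B):
--                 B=B-1
--             else:
--                 C=C-1
--         else:
--             FinalPoints=FinalPoints+x
--         i=i+1
--     return FinalPoints
-- ===== SOURCE B (Python) =====
-- def getMaximumPoints(A, B, C, N):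
--     # Closed-form O(1): the greedy takes values in three phases
--     # (single counter above the 2nd, pairs above the 3rd, triples down to 1),
--     # each phase summed as an arithmetic series.
--     if N <= 0:
--         return 0
--     x, y, z = sorted((A, B, C), reverse=True)
--     if x <= 0:
--         return N * x
--     yp = max(y, 0)
--     zp = max(z, 0)
--
--     def T(v):
--         return v * (v + 1) // 2
--
--     n1 = x - yp
--     n2 = 2 * (yp - zp)
--     if N <= n1:
--         return T(x) - T(x - N)
--     if N <= n1 + n2:
--         k = N - n1
--         q, r = divmod(k, 2)
--         return (T(x) - T(yp)) + 2 * (T(yp) - T(yp - q)) + r * (yp - q)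
--     if N <= n1 + n2 + 3 * zp:
--         k = N - n1 - n2
--         q, r = divmod(k, 3)
--         return (T(x) - T(yp)) + 2 * (T(yp) - T(zp)) + 3 * (T(zp) - T(zp - q)) + r * (zp - q)
--     return T(x) + T(yp) + T(zp)
-- ===== Notes on version B (the rewrite author's own statement) =====
-- stated objective: faster
-- what changed: Replaced the N-step greedy simulation by an O(1) closed form: sort the three counters once, split the N picks into three phases (lone max down to the 2nd value, pairs down to the 3rd, triples down to 1, then zeros) and sum each phase as an arithmetic series via triangular numbers and divmod.
import Mathlib
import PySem

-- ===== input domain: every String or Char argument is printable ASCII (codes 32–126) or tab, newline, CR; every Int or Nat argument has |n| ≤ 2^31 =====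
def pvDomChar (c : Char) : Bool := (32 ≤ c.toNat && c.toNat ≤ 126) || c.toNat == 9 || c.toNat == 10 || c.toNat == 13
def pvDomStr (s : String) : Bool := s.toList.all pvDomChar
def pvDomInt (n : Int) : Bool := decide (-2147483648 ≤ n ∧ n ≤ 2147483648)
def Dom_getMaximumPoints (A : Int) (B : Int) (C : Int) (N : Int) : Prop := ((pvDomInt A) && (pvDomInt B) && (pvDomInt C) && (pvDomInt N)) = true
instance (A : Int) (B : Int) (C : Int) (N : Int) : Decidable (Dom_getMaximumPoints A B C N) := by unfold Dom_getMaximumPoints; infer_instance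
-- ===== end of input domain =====

-- B replaces A's N-step greedy simulation by an O(1) three-phase closed form
-- (sort once, then arithmetic-series sums); objective: faster (asymptotic).

-- ===== PORT A =====
-- while i<N loop: one recursive call per iteration, state (A,B,C,FinalPoints)
def pvLoopA : Nat → Int → Int → Int → Int → Int
  | 0, _, _, _, FinalPoints => FinalPoints
  | n+1, A, B, C, FinalPoints =>
      let x := max (max A B) C
      if 1 ≤ x then
        let x := max (max A B) C
        let FinalPoints := FinalPoints + x
        if x = A then pvLoopA n (A-1) B C FinalPoints
        else if x = B then pvLoopA n A (B-1) C FinalPoints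
        else pvLoopA n A B (C-1) FinalPoints
      else pvLoopA n A B C (FinalPoints + x)

def getMaximumPoints (A : Int) (B : Int) (C : Int) (N : Int) : Int :=
  pvLoopA N.toNat A B C 0

-- ===== PORT B =====
-- sorted((A,B,C), reverse=True) on a 3-tuple, written out
def pvSort3 (A B C : Int) : Int × Int × Int :=
  if B ≤ A then
    (if C ≤ B then (A, B, C) else if C ≤ A then (A, C, B) else (C, A, B))
  else
    (if C ≤ A then (B, A, C) else if C ≤ B then (B, C, A) else (C, B, A))

-- T(v) = v*(v+1)//2
def pvT (v : Int) : Int := PySem.Int.floordiv (v * (v + 1)) 2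

def getMaximumPoints_alt (A : Int) (B : Int) (C : Int) (N : Int) : Int :=
  if N ≤ 0 then 0
  else
    let x := (pvSort3 A B C).1
    let y := (pvSort3 A B C).2.1
    let z := (pvSort3 A B C).2.2
    if x ≤ 0 then N * x
    else
      let yp := max y 0
      let zp := max z 0
      let n1 := x - yp
      let n2 := 2 * (yp - zp)
      if N ≤ n1 then pvT x - pvT (x - N)
      else if N ≤ n1 + n2 then
        let k := N - n1
        let q := PySem.Int.floordiv k 2
        let r := PySem.Int.mod k 2
        (pvT x - pvT yp) + 2 * (pvT yp - pvT (yp - q)) + r * (yp - q)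
      else if N ≤ n1 + n2 + 3 * zp then
        let k := N - n1 - n2
        let q := PySem.Int.floordiv k 3
        let r := PySem.Int.mod k 3
        (pvT x - pvT yp) + 2 * (pvT yp - pvT zp) + 3 * (pvT zp - pvT (zp - q)) + r * (zp - q)
      else pvT x + pvT yp + pvT zp

-- ===== PRECONDITION & SPEC =====
def Spec_getMaximumPoints (A : Int) (B : Int) (C : Int) (N : Int) (out : Int) : Prop := out = getMaximumPoints_alt A B C N
instance (A : Int) (B : Int) (C : Int) (N : Int) (out : Int) : Decidable (Spec_getMaximumPoints A B C N out) := by unfold Spec_getMaximumPoints; infer_instance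

-- ===== CLAIM (what is proved, stated in full; the proofs are below) =====
def Claim_equal_getMaximumPoints : Prop := ∀ (A : Int) (B : Int) (C : Int) (N : Int), Dom_getMaximumPoints A B C N → Spec_getMaximumPoints A B C N (getMaximumPoints A B C N)

-- ===== LEMMAS AND PROOFS =====

-- the formula applied to an already sorted triple x ≥ y ≥ z
def pvFb (x y z N : Int) : Int :=
  if N ≤ 0 then 0
  else if x ≤ 0 then N * x
  else
    let yp := max y 0
    let zp := max z 0
    let n1 := x - yp
    let n2 := 2 * (yp - zp)
    if N ≤ n1 then pvT x - pvT (x - N)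
    else if N ≤ n1 + n2 then
      let k := N - n1
      let q := PySem.Int.floordiv k 2
      let r := PySem.Int.mod k 2
      (pvT x - pvT yp) + 2 * (pvT yp - pvT (yp - q)) + r * (yp - q)
    else if N ≤ n1 + n2 + 3 * zp then
      let k := N - n1 - n2
      let q := PySem.Int.floordiv k 3
      let r := PySem.Int.mod k 3
      (pvT x - pvT yp) + 2 * (pvT yp - pvT zp) + 3 * (pvT zp - pvT (zp - q)) + r * (zp - q)
    else pvT x + pvT yp + pvT zp

-- the sorted triple after the greedy decrements one maximal element
def pvDec (s : Int × Int × Int) : Int × Int × Int :=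
  if s.2.1 < s.1 then (s.1 - 1, s.2.1, s.2.2)
  else if s.2.2 < s.1 then (s.1, s.1 - 1, s.2.2)
  else (s.1, s.1, s.1 - 1)

lemma pvT_step (v : Int) : pvT v = v + pvT (v - 1) := by
  unfold pvT
  rw [PySem.Int.floordiv_eq_ediv_of_pos (by norm_num), PySem.Int.floordiv_eq_ediv_of_pos (by norm_num)]
  rw [show (v - 1) * (v - 1 + 1) = (v - 1) * v by ring]
  rw [show v * (v + 1) = (v - 1) * v + v * 2 by ring, Int.add_mul_ediv_right _ _ (by norm_num)]
  exact add_comm _ _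

lemma alt_eq_Fb (A B C N : Int) :
    getMaximumPoints_alt A B C N = pvFb (pvSort3 A B C).1 (pvSort3 A B C).2.1 (pvSort3 A B C).2.2 N := by
  by_cases hN : N ≤ 0 <;> simp [getMaximumPoints_alt, pvFb, hN]

lemma sort3_fst (A B C : Int) : (pvSort3 A B C).1 = max (max A B) C := by
  unfold pvSort3; split_ifs <;> simp <;> omega

lemma sort3_sorted (A B C : Int) :
    (pvSort3 A B C).2.1 ≤ (pvSort3 A B C).1 ∧ (pvSort3 A B C).2.2 ≤ (pvSort3 A B C).2.1 := by
  unfold pvSort3; split_ifs <;> simp <;> omega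

lemma sortdec_A (A B C : Int) (h : max (max A B) C = A) :
    pvSort3 (A - 1) B C = pvDec (pvSort3 A B C) := by
  unfold pvSort3 pvDec; split_ifs <;> simp_all <;> omega

lemma sortdec_B (A B C : Int) (h : max (max A B) C = B) (hA : ¬ max (max A B) C = A) :
    pvSort3 A (B - 1) C = pvDec (pvSort3 A B C) := by
  unfold pvSort3 pvDec; split_ifs <;> simp_all <;> omega

lemma sortdec_C (A B C : Int) (hA : ¬ max (max A B) C = A) (hB : ¬ max (max A B) C = B) :
    pvSort3 A B (C - 1) = pvDec (pvSort3 A B C) := by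
  unfold pvSort3 pvDec; split_ifs <;> simp_all <;> omega

lemma fdiv2 (a : Int) : PySem.Int.floordiv a 2 = a / 2 := PySem.Int.floordiv_eq_ediv_of_pos (by norm_num)
lemma fmod2 (a : Int) : PySem.Int.mod a 2 = a % 2 := PySem.Int.mod_eq_emod_of_pos (by norm_num)
lemma fdiv3 (a : Int) : PySem.Int.floordiv a 3 = a / 3 := PySem.Int.floordiv_eq_ediv_of_pos (by norm_num)
lemma fmod3 (a : Int) : PySem.Int.mod a 3 = a % 3 := PySem.Int.mod_eq_emod_of_pos (by norm_num)

lemma Fb_step_gt (x y z N : Int) (hxy : y < x) (hyz : z ≤ y) (hx : 1 ≤ x) (hN : 2 ≤ N) (hx2 : 2 ≤ x) :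
    pvFb x y z N = x + pvFb (x - 1) y z (N - 1) := by
  unfold pvFb
  simp only [fdiv2, fmod2, fdiv3, fmod3]
  rw [show N - 1 - (x - 1 - max y 0) = N - (x - max y 0) by ring]
  rw [show x - 1 - (N - 1) = x - N by ring]
  split_ifs <;> first | (exfalso; omega) | linarith [pvT_step x]

lemma pvFb_nonpos (a b c M : Int) (h : M ≤ 0) : pvFb a b c M = 0 := by
  unfold pvFb; rw [if_pos h]

lemma pvFb_zero_x (b c M : Int) (h : 1 ≤ M) : pvFb 0 b c M = 0 := by
  unfold pvFb
  rw [if_neg (show ¬ M ≤ 0 by omega), if_pos le_rfl, mul_zero]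

lemma Fb_one (x y z : Int) (hxy : y ≤ x) (hyz : z ≤ y) (hx : 1 ≤ x) :
    pvFb x y z 1 = x := by
  unfold pvFb
  simp only [fdiv2, fmod2, fdiv3, fmod3]
  split_ifs with h1 h2 h3 h4 h5
  · exfalso; omega
  · exfalso; omega
  · linarith [pvT_step x]
  · have hy : max y 0 = x := by omega
    rw [hy, show (1:Int) - (x - x) = 1 by ring, show (1:Int)/2 = 0 by decide,
      show (1:Int)%2 = 1 by decide, sub_zero]
    linarith
  · have hy : max y 0 = x := by omega
    have hz : max z 0 = x := by omega
    rw [hy, hz, show (1:Int) - (x - x) - 2*(x - x) = 1 by ring, show (1:Int)/3 = 0 by decide,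
      show (1:Int)%3 = 1 by decide, sub_zero]
    linarith
  · exfalso; omega

lemma Fb_gt_one (y z N : Int) (hy : y ≤ 0) (hz : z ≤ y) (hN : 2 ≤ N) :
    pvFb 1 y z N = 1 := by
  unfold pvFb
  rw [show max y 0 = 0 by omega, show max z 0 = 0 by omega]
  split_ifs <;>
    first
      | (exfalso; omega)
      | (norm_num [show pvT 1 = 1 by decide, show pvT 0 = 0 by decide];
         try (split_ifs <;> first | (exfalso; omega) | rfl))

lemma Fb_two_eq2 (x z : Int) (hz : z < x) (hx : 1 ≤ x) :
    pvFb x x z 2 = 2 * x := by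
  unfold pvFb
  simp only [fdiv2, fmod2, fdiv3, fmod3]
  rw [show max x 0 = x by omega]
  split_ifs <;> first
    | (exfalso; omega)
    | (rw [show (2:Int) - (x - x) = 2 by ring, show (2:Int)/2 = 1 by decide,
        show (2:Int)%2 = 0 by decide]
       linarith [pvT_step x])

lemma Fb_two_eq3 (x : Int) (hx : 1 ≤ x) :
    pvFb x x x 2 = 2 * x := by
  unfold pvFb
  simp only [fdiv2, fmod2, fdiv3, fmod3]
  rw [show max x 0 = x by omega]
  split_ifs <;> first
    | (exfalso; omega)
    | (rw [show (2:Int) - (x - x) = 2 by ring, show (2:Int)/2 = 1 by decide,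
        show (2:Int)%2 = 0 by decide]
       linarith [pvT_step x])
    | (rw [show (2:Int) - (x - x) - 2*(x - x) = 2 by ring, show (2:Int)/3 = 0 by decide,
        show (2:Int)%3 = 2 by decide, sub_zero]
       linarith [pvT_step x])

lemma Fb_three_eq3 (x : Int) (hx : 1 ≤ x) :
    pvFb x x x 3 = 3 * x := by
  unfold pvFb
  simp only [fdiv2, fmod2, fdiv3, fmod3]
  rw [show max x 0 = x by omega]
  split_ifs <;> first
    | (exfalso; omega)
    | (rw [show (3:Int) - (x - x) - 2*(x - x) = 3 by ring, show (3:Int)/3 = 1 by decide,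
        show (3:Int)%3 = 0 by decide]
       linarith [pvT_step x])

lemma Fb_step_eq2 (x z N : Int) (hz : z < x) (hx : 1 ≤ x) (hN : 3 ≤ N) :
    pvFb x x z N = x + pvFb x (x - 1) z (N - 1) := by
  unfold pvFb
  simp only [fdiv2, fmod2, fdiv3, fmod3]
  rw [show max x 0 = x by omega, show max (x - 1) 0 = x - 1 by omega]
  rw [show N - 1 - (x - (x - 1)) = N - 2 by ring]
  rw [show N - 2 - 2*(x - 1 - max z 0) = N - (x - x) - 2*(x - max z 0) by ring]
  rw [show (N - 2)/2 = (N - (x - x))/2 - 1 by omega, show (N - 2)%2 = (N - (x - x))%2 by omega]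
  rw [show x - 1 - ((N - (x - x))/2 - 1) = x - (N - (x - x))/2 by ring]
  split_ifs <;> first | (exfalso; omega) | linarith [pvT_step x]

lemma Fb_step_eq3 (x N : Int) (hx : 1 ≤ x) (hN : 4 ≤ N) :
    pvFb x x x N = x + pvFb x x (x - 1) (N - 1) := by
  unfold pvFb
  simp only [fdiv2, fmod2, fdiv3, fmod3]
  rw [show max x 0 = x by omega, show max (x - 1) 0 = x - 1 by omega]
  rw [show N - 1 - (x - x) - 2*(x - (x - 1)) = N - 3 by ring]
  rw [show (N - 3)/3 = (N - (x - x) - 2*(x - x))/3 - 1 by omega,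
    show (N - 3)%3 = (N - (x - x) - 2*(x - x))%3 by omega]
  rw [show x - 1 - ((N - (x - x) - 2*(x - x))/3 - 1) = x - (N - (x - x) - 2*(x - x))/3 by ring]
  split_ifs <;> first | (exfalso; omega) | linarith [pvT_step x]

lemma Fb_step (x y z N : Int) (hxy : y ≤ x) (hyz : z ≤ y) (hx : 1 ≤ x) (hN : 1 ≤ N) :
    pvFb x y z N = x + pvFb (pvDec (x, y, z)).1 (pvDec (x, y, z)).2.1 (pvDec (x, y, z)).2.2 (N - 1) := by
  by_cases hA : y < x
  · have hd : pvDec (x, y, z) = (x - 1, y, z) := by simp [pvDec, hA]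
    rw [hd]
    show pvFb x y z N = x + pvFb (x - 1) y z (N - 1)
    by_cases hN1 : N = 1
    · subst hN1
      rw [Fb_one x y z hxy hyz hx, pvFb_nonpos (x - 1) y z (1 - 1) (by norm_num)]
      ring
    · by_cases hx2 : 2 ≤ x
      · exact Fb_step_gt x y z N hA hyz hx (by omega) hx2
      · have hx1 : x = 1 := by omega
        subst hx1
        rw [Fb_gt_one y z N (by omega) hyz (by omega), show (1:Int) - 1 = 0 by norm_num,
          pvFb_zero_x y z (N - 1) (by omega)]
        ring
  · have hyx : y = x := by omega
    subst hyx
    by_cases hB : z < y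
    · have hd : pvDec (y, y, z) = (y, y - 1, z) := by simp [pvDec, hB]
      rw [hd]
      show pvFb y y z N = y + pvFb y (y - 1) z (N - 1)
      by_cases hN1 : N = 1
      · subst hN1
        rw [Fb_one y y z le_rfl hyz hx, pvFb_nonpos y (y - 1) z (1 - 1) (by norm_num)]
        ring
      · by_cases hN2 : N = 2
        · subst hN2
          rw [Fb_two_eq2 y z hB hx, show (2:Int) - 1 = 1 by norm_num,
            Fb_one y (y - 1) z (by omega) (by omega) hx]
          ring
        · exact Fb_step_eq2 y z N hB hx (by omega)
    · have hzx : z = y := by omega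
      subst hzx
      have hd : pvDec (z, z, z) = (z, z, z - 1) := by simp [pvDec]
      rw [hd]
      show pvFb z z z N = z + pvFb z z (z - 1) (N - 1)
      by_cases hN1 : N = 1
      · subst hN1
        rw [Fb_one z z z le_rfl le_rfl hx, pvFb_nonpos z z (z - 1) (1 - 1) (by norm_num)]
        ring
      · by_cases hN2 : N = 2
        · subst hN2
          rw [Fb_two_eq3 z hx, show (2:Int) - 1 = 1 by norm_num,
            Fb_one z z (z - 1) le_rfl (by omega) hx]
          ring
        · by_cases hN3 : N = 3
          · subst hN3
            rw [Fb_three_eq3 z hx, show (3:Int) - 1 = 2 by norm_num,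
              Fb_two_eq2 z (z - 1) (by omega) hx]
            ring
          · exact Fb_step_eq3 z N hx (by omega)

lemma alt_step_dec (A B C M : Int) (hM : 1 ≤ M) (hx : 1 ≤ max (max A B) C) :
    getMaximumPoints_alt A B C M =
      max (max A B) C +
        (if max (max A B) C = A then getMaximumPoints_alt (A - 1) B C (M - 1)
         else if max (max A B) C = B then getMaximumPoints_alt A (B - 1) C (M - 1)
         else getMaximumPoints_alt A B (C - 1) (M - 1)) := by
  have hs := sort3_sorted A B C
  have hf := sort3_fst A B C
  have hstep := Fb_step (pvSort3 A B C).1 (pvSort3 A B C).2.1 (pvSort3 A B C).2.2 M hs.1 hs.2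
    (by omega) hM
  split_ifs with h1 h2
  · rw [alt_eq_Fb A B C M, hstep, alt_eq_Fb (A - 1) B C (M - 1), sortdec_A A B C h1, hf, ← hf]
  · rw [alt_eq_Fb A B C M, hstep, alt_eq_Fb A (B - 1) C (M - 1), sortdec_B A B C h2 h1, hf, ← hf]
  · rw [alt_eq_Fb A B C M, hstep, alt_eq_Fb A B (C - 1) (M - 1), sortdec_C A B C h1 h2, hf, ← hf]

lemma alt_step_zero (A B C M : Int) (hM : 1 ≤ M) (hx : max (max A B) C ≤ 0) :
    getMaximumPoints_alt A B C M = max (max A B) C + getMaximumPoints_alt A B C (M - 1) := by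
  have hf := sort3_fst A B C
  rw [alt_eq_Fb, alt_eq_Fb]
  unfold pvFb
  rw [hf]
  by_cases h1 : M - 1 ≤ 0
  · have hM1 : M = 1 := by omega
    subst hM1
    rw [if_neg (show ¬ (1:Int) ≤ 0 by norm_num), if_pos hx,
      if_pos (show (1:Int) - 1 ≤ 0 by norm_num)]
    ring
  · rw [if_neg (show ¬ M ≤ 0 by omega), if_pos hx, if_neg h1, if_pos hx]
    ring

lemma loop_eq (n : Nat) : ∀ (A B C FP : Int),
    pvLoopA n A B C FP = FP + getMaximumPoints_alt A B C (n : Int) := by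
  induction n with
  | zero =>
    intro A B C FP
    simp [pvLoopA, getMaximumPoints_alt]
  | succ n ih =>
    intro A B C FP
    have hM : (1 : Int) ≤ (n : Int) + 1 := by omega
    have hsub : ((n : Int) + 1) - 1 = (n : Int) := by ring
    push_cast
    by_cases hx : 1 ≤ max (max A B) C
    · by_cases h1 : max (max A B) C = A
      · rw [show pvLoopA (n + 1) A B C FP
              = pvLoopA n (A - 1) B C (FP + max (max A B) C) by
            simp only [pvLoopA]; rw [if_pos hx, if_pos h1]]
        rw [ih, alt_step_dec A B C ((n : Int) + 1) hM hx, if_pos h1, hsub]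
        ring
      · by_cases h2 : max (max A B) C = B
        · rw [show pvLoopA (n + 1) A B C FP
                = pvLoopA n A (B - 1) C (FP + max (max A B) C) by
              simp only [pvLoopA]; rw [if_pos hx, if_neg h1, if_pos h2]]
          rw [ih, alt_step_dec A B C ((n : Int) + 1) hM hx, if_neg h1, if_pos h2, hsub]
          ring
        · rw [show pvLoopA (n + 1) A B C FP
                = pvLoopA n A B (C - 1) (FP + max (max A B) C) by
              simp only [pvLoopA]; rw [if_pos hx, if_neg h1, if_neg h2]]
          rw [ih, alt_step_dec A B C ((n : Int) + 1) hM hx, if_neg h1, if_neg h2, hsub]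
          ring
    · rw [show pvLoopA (n + 1) A B C FP = pvLoopA n A B C (FP + max (max A B) C) by
          simp only [pvLoopA]; rw [if_neg hx]]
      rw [ih, alt_step_zero A B C ((n : Int) + 1) hM (by omega), hsub]
      ring

-- ===== VERDICT (by name: the statement is the Claim_ definition above) =====
theorem getMaximumPoints_spec : Claim_equal_getMaximumPoints := by
  intro A B C N _
  unfold Spec_getMaximumPoints getMaximumPoints
  rw [loop_eq, zero_add]
  by_cases h : N ≤ 0
  · rw [show (N.toNat : Int) = 0 by omega]
    rw [alt_eq_Fb, alt_eq_Fb]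
    unfold pvFb
    simp [h]
  · rw [show (N.toNat : Int) = N by omega]
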